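-- pv_equiv track=rewrite | github.com/Th3Lourde/l33tcode | 2060.py | possiblyEquals
-- ===== SOURCE A (Python) =====
-- def possiblyEquals(s1, s2):
--     dp = {}
--
--     def dfs(i, j, diff):
--         if i == len(s1) and j == len(s2):
--             return diff == 0
--
--         if (i,j,diff) in dp:
--             return dp[(i,j,diff)]
--
--         resp = False
--
--         if i < len(s1) and s1[i].isdigit():
--             k = i
--             val = 0
--
--             while k < len(s1) and s1[k].isdigit():
--                 val = val*10 + int(s1[k])
--                 k += 1
--
--                 if dfs(k, j, diff-val):
--                     resp = True
--
--         elif j < len(s2) and s2[j].isdigit():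
--             k = j
--             val = 0
--
--             while k < len(s2) and s2[k].isdigit():
--                 val = val*10 + int(s2[k])
--                 k += 1
--
--                 if dfs(i, k, diff+val):
--                     resp = True
--
--         elif diff == 0:
--             if i < len(s1) and j < len(s2) and s1[i] == s2[j] and dfs(i+1, j+1, diff):
--                 resp = True
--
--         elif diff > 0:
--             if i < len(s1) and dfs(i+1, j, diff-1):
--                 resp = True
--
--         elif diff < 0:
--             if j < len(s2) and dfs(i, j+1, diff+1):
--                 resp = True
--
--         dp[(i,j,diff)] = resp
--
--         return dp[(i,j,diff)]
--
--     dfs(0,0,0)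
--
--     return dp[(0,0,0)]
-- ===== SOURCE B (Python) =====
-- def possiblyEquals(s1, s2):
--     # Iterative forward BFS by levels over states (i, j, diff); A uses memoized DFS.
--     n, m = len(s1), len(s2)
--
--     def succs(i, j, diff):
--         out = []
--         if i < n and s1[i].isdigit():
--             k, val = i, 0
--             while k < n and s1[k].isdigit():
--                 val = val * 10 + int(s1[k])
--                 k += 1
--                 out.append((k, j, diff - val))
--         elif j < m and s2[j].isdigit():
--             k, val = j, 0
--             while k < m and s2[k].isdigit():
--                 val = val * 10 + int(s2[k])
--                 k += 1
--                 out.append((i, k, diff + val))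
--         elif diff == 0:
--             if i < n and j < m and s1[i] == s2[j]:
--                 out.append((i + 1, j + 1, diff))
--         elif diff > 0:
--             if i < n:
--                 out.append((i + 1, j, diff - 1))
--         else:
--             if j < m:
--                 out.append((i, j + 1, diff + 1))
--         return out
--
--     pending = {(0, 0, 0)}
--     for level in range(n + m + 1):
--         for (i, j, d) in [s for s in pending if s[0] + s[1] == level]:
--             for t in succs(i, j, d):
--                 pending.add(t)
--     return (n, m, 0) in pending
-- ===== Notes on version B (the rewrite author's own statement) =====
-- stated objective: alternative
-- what changed: Replaced the memoized top-down recursion with an explicit iterative forward BFS by levels over states (i, j, diff): a successor function enumerates A's transitions, a set of reachable states is grown level by level (levels = i+j, which every transition strictly increases), and the answer is whether the accepting state (len(s1), len(s2), 0) is reached.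
import Mathlib
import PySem

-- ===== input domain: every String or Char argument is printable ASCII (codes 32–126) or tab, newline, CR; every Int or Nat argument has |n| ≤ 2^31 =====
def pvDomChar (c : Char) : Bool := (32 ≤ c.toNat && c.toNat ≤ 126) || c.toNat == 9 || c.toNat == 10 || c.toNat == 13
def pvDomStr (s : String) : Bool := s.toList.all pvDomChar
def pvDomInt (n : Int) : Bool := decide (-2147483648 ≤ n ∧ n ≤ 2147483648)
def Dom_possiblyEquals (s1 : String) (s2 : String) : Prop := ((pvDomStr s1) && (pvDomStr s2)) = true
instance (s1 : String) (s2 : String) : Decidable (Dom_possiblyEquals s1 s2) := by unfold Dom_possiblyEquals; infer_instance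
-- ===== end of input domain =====

-- B (an iterative level-by-level BFS over states (i,j,diff)) replaces A's memoized recursion; same answers
-- wherever A returns (A raises KeyError on ("",""), excluded by Pre_).
-- int(c) for a single digit character c (exact under an isdigit guard).
def pyDigitVal (c : Char) : Int := (c.toNat : Int) - 48

-- ===== PORT A =====
-- dfs with the memo dict threaded through; fuel only makes the recursion structural (it never runs out:
-- every recursive call strictly increases i+j, so depth ≤ len(s1)+len(s2)+1).
mutual
def dfsA (cs1 cs2 : List Char) (fuel : Nat) (i j : Nat) (diff : Int)
    (dp : PySem.Dict (Nat × Nat × Int) Bool) : Bool × PySem.Dict (Nat × Nat × Int) Bool :=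
  match fuel with
  | 0 => (false, dp)
  | fuel + 1 =>
    if i = cs1.length ∧ j = cs2.length then (decide (diff = 0), dp)
    else
      match dp.get? (i, j, diff) with
      | some b => (b, dp)
      | none =>
        let (resp, dp1) :=
          if i < cs1.length ∧ PySem.Chars.isdigit (cs1.getD i ' ') then
            loopA1 cs1 cs2 fuel j diff i 0 false dp
          else if j < cs2.length ∧ PySem.Chars.isdigit (cs2.getD j ' ') then
            loopA2 cs1 cs2 fuel i diff j 0 false dp
          else if diff = 0 then
            if i < cs1.length ∧ j < cs2.length ∧ cs1.getD i ' ' = cs2.getD j ' ' then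
              let (r, dp') := dfsA cs1 cs2 fuel (i + 1) (j + 1) diff dp
              (false || r, dp')
            else (false, dp)
          else if diff > 0 then
            if i < cs1.length then
              let (r, dp') := dfsA cs1 cs2 fuel (i + 1) j (diff - 1) dp
              (false || r, dp')
            else (false, dp)
          else if diff < 0 then
            if j < cs2.length then
              let (r, dp') := dfsA cs1 cs2 fuel i (j + 1) (diff + 1) dp
              (false || r, dp')
            else (false, dp)
          else (false, dp)
        let dp2 := dp1.insert (i, j, diff) resp
        (dp2.getD (i, j, diff) false, dp2)
termination_by (fuel, 0)
decreasing_by all_goals omega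

-- while k < len(s1) and s1[k].isdigit(): val = val*10+int(s1[k]); k += 1; if dfs(k, j, diff-val): resp = True
def loopA1 (cs1 cs2 : List Char) (fuel : Nat) (j : Nat) (diff : Int) (k : Nat) (val : Int)
    (resp : Bool) (dp : PySem.Dict (Nat × Nat × Int) Bool) : Bool × PySem.Dict (Nat × Nat × Int) Bool :=
  if k < cs1.length ∧ PySem.Chars.isdigit (cs1.getD k ' ') then
    let val' := val * 10 + pyDigitVal (cs1.getD k ' ')
    let (r, dp') := dfsA cs1 cs2 fuel (k + 1) j (diff - val') dp
    loopA1 cs1 cs2 fuel j diff (k + 1) val' (resp || r) dp'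
  else (resp, dp)
termination_by (fuel, cs1.length - k + 1)
decreasing_by all_goals omega

-- symmetric loop over s2
def loopA2 (cs1 cs2 : List Char) (fuel : Nat) (i : Nat) (diff : Int) (k : Nat) (val : Int)
    (resp : Bool) (dp : PySem.Dict (Nat × Nat × Int) Bool) : Bool × PySem.Dict (Nat × Nat × Int) Bool :=
  if k < cs2.length ∧ PySem.Chars.isdigit (cs2.getD k ' ') then
    let val' := val * 10 + pyDigitVal (cs2.getD k ' ')
    let (r, dp') := dfsA cs1 cs2 fuel i (k + 1) (diff + val') dp
    loopA2 cs1 cs2 fuel i diff (k + 1) val' (resp || r) dp'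
  else (resp, dp)
termination_by (fuel, cs2.length - k + 1)
decreasing_by all_goals omega
end

def possiblyEquals (s1 : String) (s2 : String) : Bool :=
  let cs1 := s1.toList
  let cs2 := s2.toList
  let res := dfsA cs1 cs2 (cs1.length + cs2.length + 1) 0 0 0 PySem.Dict.empty
  -- return dp[(0,0,0)]  (KeyError when both strings are empty: excluded by Pre_)
  match res.2.get? (0, 0, 0) with
  | some b => b
  | none => false

-- ===== PORT B =====
-- the digit-run expansion of succs: while k < len(s) and s[k].isdigit(): val = val*10+int(s[k]); k += 1; out.append(...)
def runB1 (cs1 : List Char) (j : Nat) (diff : Int) (k : Nat) (val : Int)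
    (out : List (Nat × Nat × Int)) : List (Nat × Nat × Int) :=
  if k < cs1.length ∧ PySem.Chars.isdigit (cs1.getD k ' ') then
    let val' := val * 10 + pyDigitVal (cs1.getD k ' ')
    runB1 cs1 j diff (k + 1) val' (out ++ [(k + 1, j, diff - val')])
  else out
termination_by cs1.length - k
decreasing_by omega

def runB2 (cs2 : List Char) (i : Nat) (diff : Int) (k : Nat) (val : Int)
    (out : List (Nat × Nat × Int)) : List (Nat × Nat × Int) :=
  if k < cs2.length ∧ PySem.Chars.isdigit (cs2.getD k ' ') then
    let val' := val * 10 + pyDigitVal (cs2.getD k ' ')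
    runB2 cs2 i diff (k + 1) val' (out ++ [(i, k + 1, diff + val')])
  else out
termination_by cs2.length - k
decreasing_by omega

-- def succs(i, j, diff): the list of states directly reachable from (i, j, diff)
def succsB (cs1 cs2 : List Char) (i j : Nat) (diff : Int) : List (Nat × Nat × Int) :=
  if i < cs1.length ∧ PySem.Chars.isdigit (cs1.getD i ' ') then
    runB1 cs1 j diff i 0 []
  else if j < cs2.length ∧ PySem.Chars.isdigit (cs2.getD j ' ') then
    runB2 cs2 i diff j 0 []
  else if diff = 0 then
    if i < cs1.length ∧ j < cs2.length ∧ cs1.getD i ' ' = cs2.getD j ' ' then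
      [(i + 1, j + 1, diff)]
    else []
  else if diff > 0 then
    if i < cs1.length then [(i + 1, j, diff - 1)] else []
  else
    if j < cs2.length then [(i, j + 1, diff + 1)] else []

def possiblyEquals_alt (s1 : String) (s2 : String) : Bool :=
  let cs1 := s1.toList
  let cs2 := s2.toList
  let n := cs1.length
  let m := cs2.length
  -- pending = {(0,0,0)}; grow it level by level (every transition strictly increases i+j)
  let pending : PySem.Set (Nat × Nat × Int) := PySem.Set.ofList [(0, 0, 0)]
  let final := (List.range (n + m + 1)).foldl
    (fun pend level =>
      (pend.filter (fun s => s.1 + s.2.1 == level)).foldl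
        (fun pend s =>
          (succsB cs1 cs2 s.1 s.2.1 s.2.2).foldl (fun pend t => PySem.Set.add pend t) pend)
        pend)
    pending
  PySem.Set.contains final (n, m, 0)

-- ===== PRECONDITION & SPEC =====
-- Pre_ excludes only (s1, s2) = ("", ""), on which A raises KeyError (dfs returns from its base case
-- without ever storing dp[(0,0,0)]).
def Pre_possiblyEquals (s1 : String) (s2 : String) : Prop := ¬(s1 = "" ∧ s2 = "")
instance (s1 : String) (s2 : String) : Decidable (Pre_possiblyEquals s1 s2) := by unfold Pre_possiblyEquals; infer_instance
def pvWitness_possiblyEquals : String × String := ("a5", "6a")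

def Spec_possiblyEquals (s1 : String) (s2 : String) (out : Bool) : Prop := out = possiblyEquals_alt s1 s2
instance (s1 : String) (s2 : String) (out : Bool) : Decidable (Spec_possiblyEquals s1 s2 out) := by unfold Spec_possiblyEquals; infer_instance

-- ===== CLAIM (what is proved, stated in full; the proofs are below) =====
def Claim_equal_possiblyEquals : Prop := ∀ (s1 : String) (s2 : String), Dom_possiblyEquals s1 s2 → Pre_possiblyEquals s1 s2 → Spec_possiblyEquals s1 s2 (possiblyEquals s1 s2)

-- ===== LEMMAS AND PROOFS =====

-- Fuel-indexed acceptance predicate: accR f i j d decides (for sufficient fuel) whether state (i,j,d)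
-- can reach the accepting state, by A's branch structure (succsB enumerates exactly A's transitions).
def accR (cs1 cs2 : List Char) : Nat → Nat → Nat → Int → Bool
  | 0, _, _, _ => false
  | f + 1, i, j, d =>
    if i = cs1.length ∧ j = cs2.length then decide (d = 0)
    else (succsB cs1 cs2 i j d).any (fun t => accR cs1 cs2 f t.1 t.2.1 t.2.2)

-- Reachability along succsB transitions.
inductive ReachF (cs1 cs2 : List Char) : (Nat × Nat × Int) → (Nat × Nat × Int) → Prop
  | refl (s : Nat × Nat × Int) : ReachF cs1 cs2 s s
  | head {s t u : Nat × Nat × Int} : t ∈ succsB cs1 cs2 s.1 s.2.1 s.2.2 →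
      ReachF cs1 cs2 t u → ReachF cs1 cs2 s u

-- run accumulators append
theorem runB1_acc (cs1 : List Char) (j : Nat) (d : Int) (k : Nat) (v : Int) (out : List (Nat × Nat × Int)) :
    runB1 cs1 j d k v out = out ++ runB1 cs1 j d k v [] := by
  by_cases h : k < cs1.length ∧ PySem.Chars.isdigit (cs1.getD k ' ')
  · conv_lhs => rw [runB1]
    conv_rhs => rw [runB1]
    rw [if_pos h, if_pos h]
    rw [runB1_acc cs1 j d (k + 1) _ (out ++ _), runB1_acc cs1 j d (k + 1) _ ([] ++ _)]
    simp
  · conv_lhs => rw [runB1]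
    conv_rhs => rw [runB1]
    rw [if_neg h, if_neg h]
    simp
termination_by cs1.length - k
decreasing_by all_goals exact Nat.sub_succ_lt_self _ _ h.1

theorem runB2_acc (cs2 : List Char) (i : Nat) (d : Int) (k : Nat) (v : Int) (out : List (Nat × Nat × Int)) :
    runB2 cs2 i d k v out = out ++ runB2 cs2 i d k v [] := by
  by_cases h : k < cs2.length ∧ PySem.Chars.isdigit (cs2.getD k ' ')
  · conv_lhs => rw [runB2]
    conv_rhs => rw [runB2]
    rw [if_pos h, if_pos h]
    rw [runB2_acc cs2 i d (k + 1) _ (out ++ _), runB2_acc cs2 i d (k + 1) _ ([] ++ _)]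
    simp
  · conv_lhs => rw [runB2]
    conv_rhs => rw [runB2]
    rw [if_neg h, if_neg h]
    simp
termination_by cs2.length - k
decreasing_by all_goals exact Nat.sub_succ_lt_self _ _ h.1

theorem mem_runB1 (cs1 : List Char) (j : Nat) (d : Int) (k : Nat) (v : Int) (t : Nat × Nat × Int)
    (h : t ∈ runB1 cs1 j d k v []) : k < t.1 ∧ t.1 ≤ cs1.length ∧ t.2.1 = j := by
  by_cases hk : k < cs1.length ∧ PySem.Chars.isdigit (cs1.getD k ' ')
  · rw [runB1, if_pos hk, runB1_acc] at h
    rcases List.mem_append.1 h with h1 | h1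
    · simp only [List.nil_append, List.mem_singleton] at h1
      subst h1
      refine ⟨?_, ?_, ?_⟩ <;> simp <;> omega
    · have := mem_runB1 cs1 j d (k + 1) _ t h1
      exact ⟨by omega, this.2.1, this.2.2⟩
  · rw [runB1, if_neg hk] at h
    simp at h
termination_by cs1.length - k
decreasing_by all_goals exact Nat.sub_succ_lt_self _ _ hk.1

theorem mem_runB2 (cs2 : List Char) (i : Nat) (d : Int) (k : Nat) (v : Int) (t : Nat × Nat × Int)
    (h : t ∈ runB2 cs2 i d k v []) : k < t.2.1 ∧ t.2.1 ≤ cs2.length ∧ t.1 = i := by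
  by_cases hk : k < cs2.length ∧ PySem.Chars.isdigit (cs2.getD k ' ')
  · rw [runB2, if_pos hk, runB2_acc] at h
    rcases List.mem_append.1 h with h1 | h1
    · simp only [List.nil_append, List.mem_singleton] at h1
      subst h1
      refine ⟨?_, ?_, ?_⟩ <;> simp <;> omega
    · have := mem_runB2 cs2 i d (k + 1) _ t h1
      exact ⟨by omega, this.2.1, this.2.2⟩
  · rw [runB2, if_neg hk] at h
    simp at h
termination_by cs2.length - k
decreasing_by all_goals exact Nat.sub_succ_lt_self _ _ hk.1

-- every transition stays in bounds and strictly increases i + j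
theorem succs_bounds (cs1 cs2 : List Char) (i j : Nat) (d : Int) (hi : i ≤ cs1.length)
    (hj : j ≤ cs2.length) (t : Nat × Nat × Int) (h : t ∈ succsB cs1 cs2 i j d) :
    t.1 ≤ cs1.length ∧ t.2.1 ≤ cs2.length ∧ i + j < t.1 + t.2.1 := by
  unfold succsB at h
  split at h
  · obtain ⟨a, b, c⟩ := mem_runB1 cs1 j d i 0 t h
    omega
  · split at h
    · obtain ⟨a, b, c⟩ := mem_runB2 cs2 i d j 0 t h
      omega
    · split at h
      · split at h
        · rename_i hg
          rw [List.mem_singleton] at h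
          subst h
          obtain ⟨g1, g2, -⟩ := hg
          refine ⟨?_, ?_, ?_⟩ <;> simp <;> omega
        · simp at h
      · split at h
        · split at h
          · rename_i hg
            rw [List.mem_singleton] at h
            subst h
            refine ⟨?_, ?_, ?_⟩ <;> simp <;> omega
          · simp at h
        · split at h
          · rename_i hg
            rw [List.mem_singleton] at h
            subst h
            refine ⟨?_, ?_, ?_⟩ <;> simp <;> omega
          · simp at h

theorem succs_base (cs1 cs2 : List Char) (d : Int) :
    succsB cs1 cs2 cs1.length cs2.length d = [] := by
  unfold succsB
  simp

theorem any_congr' {α : Type} (l : List α) (f g : α → Bool) (h : ∀ a ∈ l, f a = g a) :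
    l.any f = l.any g := by
  induction l with
  | nil => rfl
  | cons a l ih =>
    simp only [List.any_cons, h a (by simp)]
    rw [ih (fun b hb => h b (by simp [hb]))]

theorem accR_mono (cs1 cs2 : List Char) (f f' i j : Nat) (d : Int) (hi : i ≤ cs1.length)
    (hj : j ≤ cs2.length) (hf : (cs1.length - i) + (cs2.length - j) < f)
    (hf' : (cs1.length - i) + (cs2.length - j) < f') :
    accR cs1 cs2 f i j d = accR cs1 cs2 f' i j d := by
  induction f generalizing f' i j d with
  | zero => omega
  | succ f ih =>
    match f', hf' with
    | f' + 1, hf' =>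
      simp only [accR]
      split
      · rfl
      · apply any_congr'
        intro t ht
        obtain ⟨a, b, c⟩ := succs_bounds cs1 cs2 i j d hi hj t ht
        exact ih f' t.1 t.2.1 t.2.2 a b (by omega) (by omega)

-- the canonical acceptance value R = accR (n+m+1), and its one-step unfolding
theorem accR_unfold (cs1 cs2 : List Char) (i j : Nat) (d : Int) (hi : i ≤ cs1.length)
    (hj : j ≤ cs2.length) :
    accR cs1 cs2 (cs1.length + cs2.length + 1) i j d =
      (if i = cs1.length ∧ j = cs2.length then decide (d = 0)
       else (succsB cs1 cs2 i j d).any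
         (fun t => accR cs1 cs2 (cs1.length + cs2.length + 1) t.1 t.2.1 t.2.2)) := by
  conv_lhs => rw [accR]
  split
  · rfl
  · apply any_congr'
    intro t ht
    obtain ⟨a, b, c⟩ := succs_bounds cs1 cs2 i j d hi hj t ht
    exact accR_mono cs1 cs2 _ _ t.1 t.2.1 t.2.2 a b (by omega) (by omega)

theorem reach_snoc (cs1 cs2 : List Char) (a p t : Nat × Nat × Int) (h : ReachF cs1 cs2 a p)
    (ht : t ∈ succsB cs1 cs2 p.1 p.2.1 p.2.2) : ReachF cs1 cs2 a t := by
  induction h with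
  | refl s => exact ReachF.head ht (ReachF.refl t)
  | head hs hr ih => exact ReachF.head hs (ih ht)

theorem reach_snoc_inv (cs1 cs2 : List Char) (a p : Nat × Nat × Int) (h : ReachF cs1 cs2 a p) :
    p = a ∨ ∃ q, ReachF cs1 cs2 a q ∧ p ∈ succsB cs1 cs2 q.1 q.2.1 q.2.2 := by
  induction h with
  | refl s => exact Or.inl rfl
  | head hs hr ih =>
    rcases ih with rfl | ⟨q, hq, hm⟩
    · exact Or.inr ⟨_, ReachF.refl _, hs⟩
    · exact Or.inr ⟨q, ReachF.head hs hq, hm⟩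

theorem reach_bounds (cs1 cs2 : List Char) (a p : Nat × Nat × Int)
    (h : ReachF cs1 cs2 a p) (ha : a.1 ≤ cs1.length) (hb : a.2.1 ≤ cs2.length) :
    p.1 ≤ cs1.length ∧ p.2.1 ≤ cs2.length := by
  induction h with
  | refl s => exact ⟨ha, hb⟩
  | head hs hr ih =>
    rename_i s t u
    obtain ⟨b1, b2, -⟩ := succs_bounds cs1 cs2 s.1 s.2.1 s.2.2 ha hb t hs
    exact ih b1 b2

theorem acc_iff_reach_base (cs1 cs2 : List Char) (d : Int) :
    accR cs1 cs2 (cs1.length + cs2.length + 1) cs1.length cs2.length d = true ↔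
      ReachF cs1 cs2 (cs1.length, cs2.length, d) (cs1.length, cs2.length, 0) := by
  simp only [accR, and_self, if_true, decide_eq_true_iff]
  constructor
  · intro hd
    subst hd
    exact ReachF.refl _
  · intro hr
    cases hr with
    | refl => rfl
    | head hs hr' =>
      rw [show ((cs1.length, cs2.length, d) : Nat × Nat × Int).1 = cs1.length from rfl] at hs
      rw [show ((cs1.length, cs2.length, d) : Nat × Nat × Int).2.1 = cs2.length from rfl] at hs
      rw [succs_base] at hs
      simp at hs

theorem acc_iff_reach (cs1 cs2 : List Char) (K i j : Nat) (d : Int) (hi : i ≤ cs1.length)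
    (hj : j ≤ cs2.length) (hK : (cs1.length - i) + (cs2.length - j) ≤ K) :
    accR cs1 cs2 (cs1.length + cs2.length + 1) i j d = true ↔
      ReachF cs1 cs2 (i, j, d) (cs1.length, cs2.length, 0) := by
  induction K generalizing i j d with
  | zero =>
    have hi' : i = cs1.length := by omega
    have hj' : j = cs2.length := by omega
    subst hi'; subst hj'
    exact acc_iff_reach_base cs1 cs2 d
  | succ K ih =>
    by_cases hb : i = cs1.length ∧ j = cs2.length
    · obtain ⟨rfl, rfl⟩ := hb
      exact acc_iff_reach_base cs1 cs2 d
    · rw [accR_unfold cs1 cs2 i j d hi hj, if_neg hb]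
      constructor
      · intro hany
        rw [List.any_eq_true] at hany
        obtain ⟨t, ht, hacc⟩ := hany
        obtain ⟨b1, b2, b3⟩ := succs_bounds cs1 cs2 i j d hi hj t ht
        have hm : (cs1.length - t.1) + (cs2.length - t.2.1) ≤ K := by omega
        exact ReachF.head ht ((ih t.1 t.2.1 t.2.2 b1 b2 hm).1 hacc)
      · intro hr
        cases hr with
        | refl => exact absurd ⟨rfl, rfl⟩ hb
        | head ht hr' =>
          rename_i t
          rw [List.any_eq_true]
          obtain ⟨b1, b2, b3⟩ := succs_bounds cs1 cs2 i j d hi hj t ht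
          have hm : (cs1.length - t.1) + (cs2.length - t.2.1) ≤ K := by omega
          exact ⟨t, ht, (ih t.1 t.2.1 t.2.2 b1 b2 hm).2 hr'⟩

-- ===== A-side: memo-table correctness =====
def dpOK (cs1 cs2 : List Char) (dp : PySem.Dict (Nat × Nat × Int) Bool) : Prop :=
  ∀ p b, dp.get? p = some b → b = accR cs1 cs2 (cs1.length + cs2.length + 1) p.1 p.2.1 p.2.2

theorem loopA1_ok (cs1 cs2 : List Char) (fuel : Nat)
    (hdfs : ∀ i j d dp, i ≤ cs1.length → j ≤ cs2.length →
      (cs1.length - i) + (cs2.length - j) < fuel → dpOK cs1 cs2 dp →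
      (dfsA cs1 cs2 fuel i j d dp).1 = accR cs1 cs2 (cs1.length + cs2.length + 1) i j d ∧
      dpOK cs1 cs2 (dfsA cs1 cs2 fuel i j d dp).2)
    (j : Nat) (d : Int) :
    ∀ k val resp dp, j ≤ cs2.length → (cs1.length - k) + (cs2.length - j) ≤ fuel →
      dpOK cs1 cs2 dp →
      (loopA1 cs1 cs2 fuel j d k val resp dp).1 =
        (resp || (runB1 cs1 j d k val []).any
          (fun t => accR cs1 cs2 (cs1.length + cs2.length + 1) t.1 t.2.1 t.2.2)) ∧
      dpOK cs1 cs2 (loopA1 cs1 cs2 fuel j d k val resp dp).2 := by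
  intro k val resp dp hj hfuel hdp
  by_cases h : k < cs1.length ∧ PySem.Chars.isdigit (cs1.getD k ' ')
  · rw [loopA1, if_pos h]
    rw [runB1, if_pos h, runB1_acc]
    obtain ⟨e1, e2⟩ := hdfs (k + 1) j (d - (val * 10 + pyDigitVal (cs1.getD k ' '))) dp
      (by omega) hj (by omega) hdp
    obtain ⟨f1, f2⟩ := loopA1_ok cs1 cs2 fuel hdfs j d (k + 1)
      (val * 10 + pyDigitVal (cs1.getD k ' '))
      (resp || (dfsA cs1 cs2 fuel (k + 1) j (d - (val * 10 + pyDigitVal (cs1.getD k ' '))) dp).1)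
      (dfsA cs1 cs2 fuel (k + 1) j (d - (val * 10 + pyDigitVal (cs1.getD k ' '))) dp).2
      hj (by omega) e2
    refine ⟨?_, f2⟩
    rw [f1, e1]
    simp [Bool.or_assoc]
  · rw [loopA1, if_neg h, runB1, if_neg h]
    simp [hdp]
termination_by k => cs1.length - k
decreasing_by all_goals exact Nat.sub_succ_lt_self _ _ h.1

theorem loopA2_ok (cs1 cs2 : List Char) (fuel : Nat)
    (hdfs : ∀ i j d dp, i ≤ cs1.length → j ≤ cs2.length →
      (cs1.length - i) + (cs2.length - j) < fuel → dpOK cs1 cs2 dp →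
      (dfsA cs1 cs2 fuel i j d dp).1 = accR cs1 cs2 (cs1.length + cs2.length + 1) i j d ∧
      dpOK cs1 cs2 (dfsA cs1 cs2 fuel i j d dp).2)
    (i : Nat) (d : Int) :
    ∀ k val resp dp, i ≤ cs1.length → (cs1.length - i) + (cs2.length - k) ≤ fuel →
      dpOK cs1 cs2 dp →
      (loopA2 cs1 cs2 fuel i d k val resp dp).1 =
        (resp || (runB2 cs2 i d k val []).any
          (fun t => accR cs1 cs2 (cs1.length + cs2.length + 1) t.1 t.2.1 t.2.2)) ∧
      dpOK cs1 cs2 (loopA2 cs1 cs2 fuel i d k val resp dp).2 := by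
  intro k val resp dp hi hfuel hdp
  by_cases h : k < cs2.length ∧ PySem.Chars.isdigit (cs2.getD k ' ')
  · rw [loopA2, if_pos h]
    rw [runB2, if_pos h, runB2_acc]
    obtain ⟨e1, e2⟩ := hdfs i (k + 1) (d + (val * 10 + pyDigitVal (cs2.getD k ' '))) dp
      hi (by omega) (by omega) hdp
    obtain ⟨f1, f2⟩ := loopA2_ok cs1 cs2 fuel hdfs i d (k + 1)
      (val * 10 + pyDigitVal (cs2.getD k ' '))
      (resp || (dfsA cs1 cs2 fuel i (k + 1) (d + (val * 10 + pyDigitVal (cs2.getD k ' '))) dp).1)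
      (dfsA cs1 cs2 fuel i (k + 1) (d + (val * 10 + pyDigitVal (cs2.getD k ' '))) dp).2
      hi (by omega) e2
    refine ⟨?_, f2⟩
    rw [f1, e1]
    simp [Bool.or_assoc]
  · rw [loopA2, if_neg h, runB2, if_neg h]
    simp [hdp]
termination_by k => cs2.length - k
decreasing_by all_goals exact Nat.sub_succ_lt_self _ _ h.1

theorem finishA (cs1 cs2 : List Char) (i j : Nat) (d : Int)
    (resp : Bool) (dp1 : PySem.Dict (Nat × Nat × Int) Bool)
    (hi : i ≤ cs1.length) (hj : j ≤ cs2.length) (hb : ¬(i = cs1.length ∧ j = cs2.length))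
    (hresp : resp = (succsB cs1 cs2 i j d).any
      (fun t => accR cs1 cs2 (cs1.length + cs2.length + 1) t.1 t.2.1 t.2.2))
    (hdp1 : dpOK cs1 cs2 dp1) :
    ((dp1.insert (i, j, d) resp).getD (i, j, d) false =
        accR cs1 cs2 (cs1.length + cs2.length + 1) i j d) ∧
    dpOK cs1 cs2 (dp1.insert (i, j, d) resp) ∧
    (dp1.insert (i, j, d) resp).get? (i, j, d) =
      some (accR cs1 cs2 (cs1.length + cs2.length + 1) i j d) := by
  have hR : accR cs1 cs2 (cs1.length + cs2.length + 1) i j d =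
      (succsB cs1 cs2 i j d).any
        (fun t => accR cs1 cs2 (cs1.length + cs2.length + 1) t.1 t.2.1 t.2.2) := by
    rw [accR_unfold cs1 cs2 i j d hi hj, if_neg hb]
  have hrr : resp = accR cs1 cs2 (cs1.length + cs2.length + 1) i j d := by rw [hresp, hR]
  refine ⟨?_, ?_, ?_⟩
  · rw [PySem.Dict.getD_insert_self, hrr]
  · intro p b hpb
    rw [PySem.Dict.get?_insert] at hpb
    split at hpb
    · rename_i hpk
      subst hpk
      rw [Option.some_inj] at hpb
      rw [← hpb, hrr]
    · exact hdp1 p b hpb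
  · rw [PySem.Dict.get?_insert_self, hrr]

theorem dfsA_ok (cs1 cs2 : List Char) (fuel : Nat) :
    ∀ i j d dp, i ≤ cs1.length → j ≤ cs2.length →
      (cs1.length - i) + (cs2.length - j) < fuel → dpOK cs1 cs2 dp →
      (dfsA cs1 cs2 fuel i j d dp).1 = accR cs1 cs2 (cs1.length + cs2.length + 1) i j d ∧
      dpOK cs1 cs2 (dfsA cs1 cs2 fuel i j d dp).2 ∧
      (¬(i = cs1.length ∧ j = cs2.length) →
        (dfsA cs1 cs2 fuel i j d dp).2.get? (i, j, d) =
          some (accR cs1 cs2 (cs1.length + cs2.length + 1) i j d)) := by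
  induction fuel with
  | zero => intro i j d dp hi hj hfuel hdp; omega
  | succ fuel ih =>
    intro i j d dp hi hj hfuel hdp
    have hdfs : ∀ i j d dp, i ≤ cs1.length → j ≤ cs2.length →
        (cs1.length - i) + (cs2.length - j) < fuel → dpOK cs1 cs2 dp →
        (dfsA cs1 cs2 fuel i j d dp).1 = accR cs1 cs2 (cs1.length + cs2.length + 1) i j d ∧
        dpOK cs1 cs2 (dfsA cs1 cs2 fuel i j d dp).2 :=
      fun i j d dp a b c e => ⟨(ih i j d dp a b c e).1, (ih i j d dp a b c e).2.1⟩
    by_cases hb : i = cs1.length ∧ j = cs2.length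
    · rw [dfsA, if_pos hb]
      obtain ⟨rfl, rfl⟩ := hb
      refine ⟨?_, hdp, fun hc => absurd ⟨rfl, rfl⟩ hc⟩
      simp [accR]
    · cases hget : dp.get? (i, j, d) with
      | some b =>
        rw [dfsA, if_neg hb, hget]
        exact ⟨hdp _ _ hget, hdp, fun _ => by rw [hget, hdp _ _ hget]⟩
      | none =>
        rw [dfsA, if_neg hb, hget]
        by_cases h1 : i < cs1.length ∧ PySem.Chars.isdigit (cs1.getD i ' ')
        · rw [if_pos h1]
          obtain ⟨f1, f2⟩ := loopA1_ok cs1 cs2 fuel hdfs j d i 0 false dp hj (by omega) hdp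
          rcases hY : loopA1 cs1 cs2 fuel j d i 0 false dp with ⟨resp, dp1⟩
          rw [hY] at f1 f2
          have hresp : resp = (succsB cs1 cs2 i j d).any
              (fun t => accR cs1 cs2 (cs1.length + cs2.length + 1) t.1 t.2.1 t.2.2) := by
            rw [show succsB cs1 cs2 i j d = runB1 cs1 j d i 0 [] from by rw [succsB, if_pos h1]]
            simpa using f1
          have hfin := finishA cs1 cs2 i j d resp dp1 hi hj hb hresp f2
          exact ⟨hfin.1, hfin.2.1, fun _ => hfin.2.2⟩
        · rw [if_neg h1]
          by_cases h2 : j < cs2.length ∧ PySem.Chars.isdigit (cs2.getD j ' ')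
          · rw [if_pos h2]
            obtain ⟨f1, f2⟩ := loopA2_ok cs1 cs2 fuel hdfs i d j 0 false dp hi (by omega) hdp
            rcases hY : loopA2 cs1 cs2 fuel i d j 0 false dp with ⟨resp, dp1⟩
            rw [hY] at f1 f2
            have hresp : resp = (succsB cs1 cs2 i j d).any
                (fun t => accR cs1 cs2 (cs1.length + cs2.length + 1) t.1 t.2.1 t.2.2) := by
              rw [show succsB cs1 cs2 i j d = runB2 cs2 i d j 0 [] from by
                rw [succsB, if_neg h1, if_pos h2]]
              simpa using f1
            have hfin := finishA cs1 cs2 i j d resp dp1 hi hj hb hresp f2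
            exact ⟨hfin.1, hfin.2.1, fun _ => hfin.2.2⟩
          · rw [if_neg h2]
            by_cases hd0 : d = 0
            · rw [if_pos hd0]
              by_cases c3 : i < cs1.length ∧ j < cs2.length ∧ cs1.getD i ' ' = cs2.getD j ' '
              · rw [if_pos c3]
                obtain ⟨e1, e2⟩ := hdfs (i + 1) (j + 1) d dp (by omega) (by omega)
                  (by omega) hdp
                rcases hY : dfsA cs1 cs2 fuel (i + 1) (j + 1) d dp with ⟨r, dp1⟩
                rw [hY] at e1 e2
                have hresp : (false || r) = (succsB cs1 cs2 i j d).any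
                    (fun t => accR cs1 cs2 (cs1.length + cs2.length + 1) t.1 t.2.1 t.2.2) := by
                  rw [show succsB cs1 cs2 i j d = [(i + 1, j + 1, d)] from by
                    rw [succsB, if_neg h1, if_neg h2, if_pos hd0, if_pos c3]]
                  simpa using e1
                have hfin := finishA cs1 cs2 i j d (false || r) dp1 hi hj hb hresp e2
                exact ⟨hfin.1, hfin.2.1, fun _ => hfin.2.2⟩
              · rw [if_neg c3]
                have hresp : (false : Bool) = (succsB cs1 cs2 i j d).any
                    (fun t => accR cs1 cs2 (cs1.length + cs2.length + 1) t.1 t.2.1 t.2.2) := by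
                  rw [show succsB cs1 cs2 i j d = [] from by
                    rw [succsB, if_neg h1, if_neg h2, if_pos hd0, if_neg c3]]
                  rfl
                have hfin := finishA cs1 cs2 i j d false dp hi hj hb hresp hdp
                exact ⟨hfin.1, hfin.2.1, fun _ => hfin.2.2⟩
            · rw [if_neg hd0]
              by_cases hdp0 : d > 0
              · rw [if_pos hdp0]
                by_cases c4 : i < cs1.length
                · rw [if_pos c4]
                  obtain ⟨e1, e2⟩ := hdfs (i + 1) j (d - 1) dp (by omega) hj (by omega) hdp
                  rcases hY : dfsA cs1 cs2 fuel (i + 1) j (d - 1) dp with ⟨r, dp1⟩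
                  rw [hY] at e1 e2
                  have hresp : (false || r) = (succsB cs1 cs2 i j d).any
                      (fun t => accR cs1 cs2 (cs1.length + cs2.length + 1) t.1 t.2.1 t.2.2) := by
                    rw [show succsB cs1 cs2 i j d = [(i + 1, j, d - 1)] from by
                      rw [succsB, if_neg h1, if_neg h2, if_neg hd0, if_pos hdp0, if_pos c4]]
                    simpa using e1
                  have hfin := finishA cs1 cs2 i j d (false || r) dp1 hi hj hb hresp e2
                  exact ⟨hfin.1, hfin.2.1, fun _ => hfin.2.2⟩
                · rw [if_neg c4]
                  have hresp : (false : Bool) = (succsB cs1 cs2 i j d).any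
                      (fun t => accR cs1 cs2 (cs1.length + cs2.length + 1) t.1 t.2.1 t.2.2) := by
                    rw [show succsB cs1 cs2 i j d = [] from by
                      rw [succsB, if_neg h1, if_neg h2, if_neg hd0, if_pos hdp0, if_neg c4]]
                    rfl
                  have hfin := finishA cs1 cs2 i j d false dp hi hj hb hresp hdp
                  exact ⟨hfin.1, hfin.2.1, fun _ => hfin.2.2⟩
              · rw [if_neg hdp0]
                have hdneg : d < 0 := by omega
                rw [if_pos hdneg]
                by_cases c5 : j < cs2.length
                · rw [if_pos c5]
                  obtain ⟨e1, e2⟩ := hdfs i (j + 1) (d + 1) dp hi (by omega) (by omega) hdp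
                  rcases hY : dfsA cs1 cs2 fuel i (j + 1) (d + 1) dp with ⟨r, dp1⟩
                  rw [hY] at e1 e2
                  have hresp : (false || r) = (succsB cs1 cs2 i j d).any
                      (fun t => accR cs1 cs2 (cs1.length + cs2.length + 1) t.1 t.2.1 t.2.2) := by
                    rw [show succsB cs1 cs2 i j d = [(i, j + 1, d + 1)] from by
                      rw [succsB, if_neg h1, if_neg h2, if_neg hd0, if_neg (by omega : ¬ d > 0),
                        if_pos c5]]
                    simpa using e1
                  have hfin := finishA cs1 cs2 i j d (false || r) dp1 hi hj hb hresp e2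
                  exact ⟨hfin.1, hfin.2.1, fun _ => hfin.2.2⟩
                · rw [if_neg c5]
                  have hresp : (false : Bool) = (succsB cs1 cs2 i j d).any
                      (fun t => accR cs1 cs2 (cs1.length + cs2.length + 1) t.1 t.2.1 t.2.2) := by
                    rw [show succsB cs1 cs2 i j d = [] from by
                      rw [succsB, if_neg h1, if_neg h2, if_neg hd0, if_neg (by omega : ¬ d > 0),
                        if_neg c5]]
                    rfl
                  have hfin := finishA cs1 cs2 i j d false dp hi hj hb hresp hdp
                  exact ⟨hfin.1, hfin.2.1, fun _ => hfin.2.2⟩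

-- ===== B-side: BFS correctness =====
def procLevel (cs1 cs2 : List Char) (pend : PySem.Set (Nat × Nat × Int)) (level : Nat) :
    PySem.Set (Nat × Nat × Int) :=
  (pend.filter (fun s => s.1 + s.2.1 == level)).foldl
    (fun pend s =>
      (succsB cs1 cs2 s.1 s.2.1 s.2.2).foldl (fun pend t => PySem.Set.add pend t) pend)
    pend

theorem mem_foldl_succs (cs1 cs2 : List Char) (states : List (Nat × Nat × Int))
    (p0 : PySem.Set (Nat × Nat × Int)) (y : Nat × Nat × Int) :
    y ∈ states.foldl
        (fun pend s =>
          (succsB cs1 cs2 s.1 s.2.1 s.2.2).foldl (fun pend t => PySem.Set.add pend t) pend)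
        p0 ↔
      y ∈ p0 ∨ ∃ s ∈ states, y ∈ succsB cs1 cs2 s.1 s.2.1 s.2.2 := by
  induction states generalizing p0 with
  | nil => simp
  | cons a l ih =>
    rw [List.foldl_cons, ih]
    have hone : y ∈ (succsB cs1 cs2 a.1 a.2.1 a.2.2).foldl (fun pend t => PySem.Set.add pend t) p0 ↔
        y ∈ p0 ∨ y ∈ succsB cs1 cs2 a.1 a.2.1 a.2.2 := by
      simpa using PySem.Set.mem_foldl_add (succsB cs1 cs2 a.1 a.2.1 a.2.2) (fun t => t) p0 y
    rw [hone]
    simp only [List.mem_cons]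
    constructor
    · rintro ((h1 | h1) | ⟨s, hs, hy⟩)
      · exact Or.inl h1
      · exact Or.inr ⟨a, Or.inl rfl, h1⟩
      · exact Or.inr ⟨s, Or.inr hs, hy⟩
    · rintro (h1 | ⟨s, rfl | hs, hy⟩)
      · exact Or.inl (Or.inl h1)
      · exact Or.inl (Or.inr hy)
      · exact Or.inr ⟨s, hs, hy⟩

theorem mem_procLevel (cs1 cs2 : List Char) (pend : PySem.Set (Nat × Nat × Int)) (level : Nat)
    (y : Nat × Nat × Int) :
    y ∈ procLevel cs1 cs2 pend level ↔
      y ∈ pend ∨ ∃ s ∈ pend, s.1 + s.2.1 = level ∧ y ∈ succsB cs1 cs2 s.1 s.2.1 s.2.2 := by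
  unfold procLevel
  rw [mem_foldl_succs]
  constructor
  · rintro (h1 | ⟨s, hs, hy⟩)
    · exact Or.inl h1
    · rw [List.mem_filter] at hs
      exact Or.inr ⟨s, hs.1, by simpa using hs.2, hy⟩
  · rintro (h1 | ⟨s, hs, hl, hy⟩)
    · exact Or.inl h1
    · exact Or.inr ⟨s, List.mem_filter.2 ⟨hs, by simpa using hl⟩, hy⟩

def pendAt (cs1 cs2 : List Char) (L : Nat) : PySem.Set (Nat × Nat × Int) :=
  (List.range L).foldl (procLevel cs1 cs2) (PySem.Set.ofList [(0, 0, 0)])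

theorem pendAt_succ (cs1 cs2 : List Char) (L : Nat) :
    pendAt cs1 cs2 (L + 1) = procLevel cs1 cs2 (pendAt cs1 cs2 L) L := by
  unfold pendAt
  rw [List.range_succ, List.foldl_append, List.foldl_cons, List.foldl_nil]

theorem pendAt_sound (cs1 cs2 : List Char) (L : Nat) (y : Nat × Nat × Int)
    (h : y ∈ pendAt cs1 cs2 L) : ReachF cs1 cs2 (0, 0, 0) y := by
  induction L generalizing y with
  | zero =>
    have : y = (0, 0, 0) := by
      have := (PySem.Set.mem_ofList [((0, 0, 0) : Nat × Nat × Int)] y).1 h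
      simpa using this
    subst this
    exact ReachF.refl _
  | succ L ih =>
    rw [pendAt_succ] at h
    rcases (mem_procLevel cs1 cs2 _ L y).1 h with h1 | ⟨s, hs, -, hy⟩
    · exact ih _ h1
    · exact reach_snoc cs1 cs2 _ s y (ih _ hs) hy

theorem pendAt_complete (cs1 cs2 : List Char) (L : Nat) :
    (0, 0, 0) ∈ pendAt cs1 cs2 L ∧
    ∀ p : Nat × Nat × Int, ReachF cs1 cs2 (0, 0, 0) p → p.1 + p.2.1 < L →
      p ∈ pendAt cs1 cs2 L ∧
      ∀ t ∈ succsB cs1 cs2 p.1 p.2.1 p.2.2, t ∈ pendAt cs1 cs2 L := by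
  induction L with
  | zero =>
    constructor
    · exact (PySem.Set.mem_ofList _ _).2 (by simp)
    · intro p _ hl
      omega
  | succ L ih =>
    have mono : ∀ y, y ∈ pendAt cs1 cs2 L → y ∈ pendAt cs1 cs2 (L + 1) := by
      intro y hy
      rw [pendAt_succ]
      exact (mem_procLevel cs1 cs2 _ L y).2 (Or.inl hy)
    refine ⟨mono _ ih.1, ?_⟩
    intro p hr hl
    by_cases hcase : p.1 + p.2.1 < L
    · obtain ⟨h1, h2⟩ := ih.2 p hr hcase
      exact ⟨mono _ h1, fun t ht => mono _ (h2 t ht)⟩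
    · have hlev : p.1 + p.2.1 = L := by omega
      have hp : p ∈ pendAt cs1 cs2 L := by
        rcases reach_snoc_inv cs1 cs2 _ p hr with rfl | ⟨q, hq, hm⟩
        · exact ih.1
        · have qb := reach_bounds cs1 cs2 _ q hq (Nat.zero_le _) (Nat.zero_le _)
          have lv := (succs_bounds cs1 cs2 q.1 q.2.1 q.2.2 qb.1 qb.2 p hm).2.2
          exact (ih.2 q hq (by omega)).2 p hm
      constructor
      · exact mono _ hp
      · intro t ht
        rw [pendAt_succ]
        exact (mem_procLevel cs1 cs2 _ L t).2 (Or.inr ⟨p, hp, hlev, ht⟩)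

theorem alt_iff_reach (s1 s2 : String) :
    possiblyEquals_alt s1 s2 = true ↔
      ReachF s1.toList s2.toList (0, 0, 0) (s1.toList.length, s2.toList.length, 0) := by
  have hshow : possiblyEquals_alt s1 s2 =
      PySem.Set.contains (pendAt s1.toList s2.toList (s1.toList.length + s2.toList.length + 1))
        (s1.toList.length, s2.toList.length, 0) := rfl
  rw [hshow, PySem.Set.contains_iff]
  set cs1 := s1.toList
  set cs2 := s2.toList
  constructor
  · exact pendAt_sound cs1 cs2 _ _
  · intro hr
    rcases reach_snoc_inv cs1 cs2 _ _ hr with heq | ⟨q, hq, hm⟩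
    · rw [heq]
      exact (pendAt_complete cs1 cs2 _).1
    · have qb := reach_bounds cs1 cs2 _ q hq (Nat.zero_le _) (Nat.zero_le _)
      have lv := (succs_bounds cs1 cs2 q.1 q.2.1 q.2.2 qb.1 qb.2 _ hm).2.2
      exact ((pendAt_complete cs1 cs2 _).2 q hq (by simp at lv; omega)).2 _ hm

-- ===== VERDICT (by name: the statement is the Claim_ definition above) =====
theorem possiblyEquals_spec : Claim_equal_possiblyEquals := by
  intro s1 s2 _ hpre
  unfold Spec_possiblyEquals
  have hnm : ¬(s1.toList.length = 0 ∧ s2.toList.length = 0) := by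
    intro ⟨h1, h2⟩
    rw [List.length_eq_zero_iff] at h1 h2
    exact hpre ⟨by rwa [← String.toList_eq_nil_iff], by rwa [← String.toList_eq_nil_iff]⟩
  have hdpe : dpOK s1.toList s2.toList PySem.Dict.empty := by
    intro p b hpb
    rw [PySem.Dict.get?_empty] at hpb
    cases hpb
  have hok := dfsA_ok s1.toList s2.toList (s1.toList.length + s2.toList.length + 1) 0 0 0
    PySem.Dict.empty (Nat.zero_le _) (Nat.zero_le _) (by omega) hdpe
  have hget := hok.2.2 (by
    intro ⟨h1, h2⟩
    exact hnm ⟨h1.symm, h2.symm⟩)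
  have hA : possiblyEquals s1 s2 =
      accR s1.toList s2.toList (s1.toList.length + s2.toList.length + 1) 0 0 0 := by
    have hdef : possiblyEquals s1 s2 =
        (match (dfsA s1.toList s2.toList (s1.toList.length + s2.toList.length + 1) 0 0 0
            PySem.Dict.empty).2.get? (0, 0, 0) with
          | some b => b
          | none => false) := rfl
    rw [hdef, hget]
  have hiff : accR s1.toList s2.toList (s1.toList.length + s2.toList.length + 1) 0 0 0 = true ↔
      possiblyEquals_alt s1 s2 = true := by
    rw [acc_iff_reach s1.toList s2.toList (s1.toList.length + s2.toList.length) 0 0 0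
      (Nat.zero_le _) (Nat.zero_le _) (by omega), alt_iff_reach]
  rw [hA]
  exact Bool.eq_iff_iff.2 hiff
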